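-- pv_equiv track=rewrite | github.com/RyanPioneer/Leetcode | 1501~2000/1718. Construct the Lexicographically Largest Valid Sequence/main.py | constructDistancedSequence
-- ===== SOURCE A (Python) =====
-- from typing import List, Optional
--
-- def constructDistancedSequence(n: int) -> List[int]:
--     res, used = [-1 for _ in range(2 * n - 1)], [False for _ in range(n)]
--
--     def dfs(x):
--         if x == 2 * n - 1:
--             return True
--         if res[x] != -1:
--             return dfs(x + 1)
--         for num in range(n, 0, -1):
--             if used[num - 1]:
--                 continue
--             if num != 1 and (x + num >= 2 * n - 1 or res[x + num] != -1):
--                 continue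
--             used[num - 1] = True
--             res[x] = num
--             if num != 1:
--                 res[x + num] = num
--             if dfs(x + 1):
--                 return True
--             used[num - 1] = False
--             res[x] = -1
--             if num != 1:
--                 res[x + num] = -1
--
--         return False
--
--     dfs(0)
--     return res
-- ===== SOURCE B (Python) =====
-- from typing import List, Optional
--
-- def constructDistancedSequence(n: int) -> List[int]:
--     size = 2 * n - 1
--     res = [-1] * size
--     used = [False] * n
--
--     def first_empty(i):
--         while i < size and res[i] != -1:
--             i += 1
--         return i
--
--     # frame = [position of the slot being filled, next candidate number to try]
--     stack = [[first_empty(0), n]]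
--     while stack:
--         x, c = stack[-1]
--         if x == size:
--             break                      # every slot filled: res is the answer
--         if c == 0:                     # candidates exhausted: backtrack
--             stack.pop()
--             if stack:
--                 px, pc = stack[-1]     # the parent placed pc + 1; undo it
--                 num = pc + 1
--                 used[num - 1] = False
--                 res[px] = -1
--                 if num != 1:
--                     res[px + num] = -1
--             continue
--         if used[c - 1] or (c != 1 and (x + c >= size or res[x + c] != -1)):
--             stack[-1][1] = c - 1       # candidate c impossible here: try c - 1
--             continue
--         used[c - 1] = True             # place c (at x and, if c != 1, at x + c)
--         res[x] = c
--         if c != 1: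
--             res[x + c] = c
--         stack[-1][1] = c - 1           # resume here with c - 1 if the rest fails
--         stack.append([first_empty(x + 1), n])
--     return res
-- ===== Notes on version B (the rewrite author's own statement) =====
-- stated objective: alternative
-- what changed: The recursive DFS (call stack, boolean return, undo duplicated around the recursive call) is replaced by an iterative while loop over a manual stack of [position, next-candidate] frames: the leftmost empty slot is found by a scan instead of index-by-index recursion, a frame records where to resume its candidate scan, and all undoing happens in a single pop step driven by the parent frame; same exponential search tree, no Python recursion (and hence no recursion-depth limit).
import Mathlib
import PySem

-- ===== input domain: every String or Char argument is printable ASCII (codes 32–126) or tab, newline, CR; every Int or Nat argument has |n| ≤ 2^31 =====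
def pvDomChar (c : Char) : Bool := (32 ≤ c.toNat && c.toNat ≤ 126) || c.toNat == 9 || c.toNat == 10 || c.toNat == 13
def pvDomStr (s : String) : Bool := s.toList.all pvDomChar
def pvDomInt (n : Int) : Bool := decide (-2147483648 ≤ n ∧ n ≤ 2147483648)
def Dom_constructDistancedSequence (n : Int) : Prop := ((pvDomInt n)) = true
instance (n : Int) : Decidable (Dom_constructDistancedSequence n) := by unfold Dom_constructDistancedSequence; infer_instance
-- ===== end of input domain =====

-- B replaces A's recursive DFS by an iterative while loop over a manual stack of
-- (position, next-candidate) frames: the leftmost empty slot is found by a scan,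
-- each frame resumes its own candidate countdown, and all undoing happens in one
-- pop step; same search tree, different decomposition (objective: alternative).

-- ===== PORT A =====
-- In A, `res[...]`/`used[...]` are only read at indices the code has checked to be
-- in range (for n ≥ 1), so `List.getD` is exact there.
def pvTryA (dfs : List Int → List Bool → Bool × List Int × List Bool) (n x : Nat) :
    Nat → List Int → List Bool → Bool × List Int × List Bool
  | 0, res, used => (false, res, used)
  | m + 1, res, used =>
    if used.getD m false then
      pvTryA dfs n x m res used
    else if m + 1 ≠ 1 ∧ (2 * n - 1 ≤ x + (m + 1) ∨ res.getD (x + (m + 1)) (-1) ≠ -1) then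
      pvTryA dfs n x m res used
    else
      let used1 := used.set m true
      let res1 := res.set x ((m : Int) + 1)
      let res2 := if m + 1 ≠ 1 then res1.set (x + (m + 1)) ((m : Int) + 1) else res1
      let out := dfs res2 used1
      if out.1 then out
      else
        let u1 := out.2.2.set m false
        let r1 := out.2.1.set x (-1)
        let r2 := if m + 1 ≠ 1 then r1.set (x + (m + 1)) (-1) else r1
        pvTryA dfs n x m r2 u1

def pvDfsA (n : Nat) : Nat → Nat → List Int → List Bool → Bool × List Int × List Bool
  | 0, _x, res, used => (true, res, used)
  | f + 1, x, res, used =>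
    if res.getD x (-1) ≠ -1 then pvDfsA n f (x + 1) res used
    else pvTryA (fun r u => pvDfsA n f (x + 1) r u) n x n res used

def constructDistancedSequence (n : Int) : List Int :=
  let N := n.toNat
  let res := List.replicate (2 * N - 1) (-1 : Int)
  let used := List.replicate N false
  (pvDfsA N (2 * N - 1) 0 res used).2.1

-- ===== PORT B =====
-- `first_empty`: scan for the leftmost unfilled slot from index i.
def pvFirstEmpty (size : Nat) (res : List Int) (i : Nat) : Nat :=
  if i < size then
    (if res.getD i (-1) ≠ -1 then pvFirstEmpty size res (i + 1) else i)
  else i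
termination_by size - i

-- fuel for the while loop, proven sufficient below (the Python loop has no fuel;
-- the 0-fuel branch is never reached from the initial state, see the proofs)
def pvFuel (N : Nat) : Nat → Nat
  | 0 => 1
  | f + 1 => (N + 1) * (pvFuel N f + 2)

-- the while loop: stack of (position, next candidate) frames, top at the head
def pvLoopB (N size : Nat) : Nat → List Int → List Bool → List (Nat × Nat) → List Int
  | 0, res, _, _ => res
  | fb + 1, res, used, stack =>
    match stack with
    | [] => res
    | (x, c) :: rest =>
      if x = size then res
      else if c = 0 then
        match rest with
        | [] => pvLoopB N size fb res used []
        | (px, pc) :: rr =>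
          let num := pc + 1
          let used1 := used.set (num - 1) false
          let res1 := res.set px (-1)
          let res2 := if num ≠ 1 then res1.set (px + num) (-1) else res1
          pvLoopB N size fb res2 used1 ((px, pc) :: rr)
      else
        if used.getD (c - 1) false = true ∨ (c ≠ 1 ∧ (size ≤ x + c ∨ res.getD (x + c) (-1) ≠ -1)) then
          pvLoopB N size fb res used ((x, c - 1) :: rest)
        else
          let used1 := used.set (c - 1) true
          let res1 := res.set x (c : Int)
          let res2 := if c ≠ 1 then res1.set (x + c) (c : Int) else res1
          pvLoopB N size fb res2 used1 ((pvFirstEmpty size res2 (x + 1), N) :: (x, c - 1) :: rest)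

def constructDistancedSequence_alt (n : Int) : List Int :=
  let N := n.toNat
  let size := 2 * N - 1
  let res := List.replicate size (-1 : Int)
  let used := List.replicate N false
  pvLoopB N size (pvFuel N size + 2) res used [(pvFirstEmpty size res 0, N)]

-- ===== PRECONDITION & SPEC =====
-- Pre_ excludes n ≤ 0, where A raises IndexError (res[0] on the empty list), and
-- n > 490, a bound that keeps A's recursion depth below CPython's default
-- recursion limit (past it A can only raise RecursionError); for n of that size
-- A's exponential backtracking is not observed to return at all, so no input on
-- which A returns a value is excluded.
def Pre_constructDistancedSequence (n : Int) : Prop := 1 ≤ n ∧ n ≤ 490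
instance (n : Int) : Decidable (Pre_constructDistancedSequence n) := by
  unfold Pre_constructDistancedSequence; infer_instance
def pvWitness_constructDistancedSequence : Int := (3)

def Spec_constructDistancedSequence (n : Int) (out : List Int) : Prop := out = constructDistancedSequence_alt n
instance (n : Int) (out : List Int) : Decidable (Spec_constructDistancedSequence n out) := by unfold Spec_constructDistancedSequence; infer_instance

-- ===== CLAIM (what is proved, stated in full; the proofs are below) =====
def Claim_equal_constructDistancedSequence : Prop := ∀ (n : Int), Dom_constructDistancedSequence n → Pre_constructDistancedSequence n → Spec_constructDistancedSequence n (constructDistancedSequence n)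

-- ===== LEMMAS AND PROOFS =====

theorem pv_set_self {α : Type} {l : List α} {i : Nat} {a : α} (h : l[i]? = some a) :
    l.set i a = l := by
  induction l generalizing i with
  | nil => simp at h
  | cons b t ih =>
    cases i with
    | zero => simp at h; subst h; simp
    | succ k => simp at h; simp [ih h]

theorem pv_getElem?_of_getD {α : Type} {l : List α} {i : Nat} {d v : α}
    (hi : i < l.length) (h : l.getD i d = v) : l[i]? = some v := by
  rw [List.getD_eq_getElem?_getD, List.getElem?_eq_getElem hi] at h
  rw [List.getElem?_eq_getElem hi]
  simpa using h

-- step lemmas for A's candidate loop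
theorem pvTryA_step_used {dfs : List Int → List Bool → Bool × List Int × List Bool}
    {n x m : Nat} {res : List Int} {used : List Bool}
    (hu : used.getD m false = true) :
    pvTryA dfs n x (m + 1) res used = pvTryA dfs n x m res used := by
  simp only [pvTryA]
  rw [if_pos hu]

theorem pvTryA_step_skip {dfs : List Int → List Bool → Bool × List Int × List Bool}
    {n x m : Nat} {res : List Int} {used : List Bool}
    (hu : used.getD m false = false)
    (hc : m + 1 ≠ 1 ∧ (2 * n - 1 ≤ x + (m + 1) ∨ res.getD (x + (m + 1)) (-1) ≠ -1)) :
    pvTryA dfs n x (m + 1) res used = pvTryA dfs n x m res used := by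
  simp only [pvTryA]
  rw [if_neg (by simp only [List.getD_eq_getElem?_getD] at hu; simp [hu]), if_pos hc]

theorem pvTryA_step_place1 {dfs : List Int → List Bool → Bool × List Int × List Bool}
    {n x m : Nat} {res : List Int} {used : List Bool}
    (hu : used.getD m false = false) (h1 : m + 1 = 1) :
    pvTryA dfs n x (m + 1) res used =
      (if (dfs (res.set x ((m : Int) + 1)) (used.set m true)).1 = true
       then dfs (res.set x ((m : Int) + 1)) (used.set m true)
       else pvTryA dfs n x m
         ((dfs (res.set x ((m : Int) + 1)) (used.set m true)).2.1.set x (-1))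
         ((dfs (res.set x ((m : Int) + 1)) (used.set m true)).2.2.set m false)) := by
  have hn : ¬(m + 1 ≠ 1) := not_not_intro h1
  simp only [pvTryA]
  rw [if_neg (by simp only [List.getD_eq_getElem?_getD] at hu; simp [hu]),
    if_neg (fun hc => hn hc.1), if_neg hn, if_neg hn]

theorem pvTryA_step_place2 {dfs : List Int → List Bool → Bool × List Int × List Bool}
    {n x m : Nat} {res : List Int} {used : List Bool}
    (hu : used.getD m false = false) (h1 : m + 1 ≠ 1)
    (hd : ¬(2 * n - 1 ≤ x + (m + 1) ∨ res.getD (x + (m + 1)) (-1) ≠ -1)) :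
    pvTryA dfs n x (m + 1) res used =
      (if (dfs ((res.set x ((m : Int) + 1)).set (x + (m + 1)) ((m : Int) + 1))
            (used.set m true)).1 = true
       then dfs ((res.set x ((m : Int) + 1)).set (x + (m + 1)) ((m : Int) + 1)) (used.set m true)
       else pvTryA dfs n x m
         (((dfs ((res.set x ((m : Int) + 1)).set (x + (m + 1)) ((m : Int) + 1))
             (used.set m true)).2.1.set x (-1)).set (x + (m + 1)) (-1))
         ((dfs ((res.set x ((m : Int) + 1)).set (x + (m + 1)) ((m : Int) + 1))
             (used.set m true)).2.2.set m false)) := by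
  simp only [pvTryA]
  rw [if_neg (by simp only [List.getD_eq_getElem?_getD] at hu; simp [hu]),
    if_neg (fun hc => hd hc.2), if_pos h1, if_pos h1]

-- step lemmas for B's loop
theorem pvLoopB_nil (N size f : Nat) (res : List Int) (used : List Bool) :
    pvLoopB N size f res used [] = res := by
  cases f <;> rfl

theorem pvLoopB_break {N size fb x c : Nat} {res : List Int} {used : List Bool}
    {rest : List (Nat × Nat)} (hx : x = size) :
    pvLoopB N size (fb + 1) res used ((x, c) :: rest) = res := by
  simp only [pvLoopB]
  rw [if_pos hx]

theorem pvLoopB_pop_root {N size fb x : Nat} {res : List Int} {used : List Bool}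
    (hx : x ≠ size) :
    pvLoopB N size (fb + 1) res used [(x, 0)] = pvLoopB N size fb res used [] := by
  simp only [pvLoopB]
  rw [if_neg hx]
  simp

theorem pvLoopB_pop {N size fb x px pc : Nat} {res : List Int} {used : List Bool}
    {rr : List (Nat × Nat)} (hx : x ≠ size) :
    pvLoopB N size (fb + 1) res used ((x, 0) :: (px, pc) :: rr) =
      pvLoopB N size fb
        (if pc + 1 ≠ 1 then (res.set px (-1)).set (px + (pc + 1)) (-1) else res.set px (-1))
        (used.set pc false) ((px, pc) :: rr) := by
  simp only [pvLoopB]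
  rw [if_neg hx]
  simp

theorem pvLoopB_skip {N size fb x c : Nat} {res : List Int} {used : List Bool}
    {rest : List (Nat × Nat)} (hx : x ≠ size)
    (hc : used.getD c false = true ∨
      (c + 1 ≠ 1 ∧ (size ≤ x + (c + 1) ∨ res.getD (x + (c + 1)) (-1) ≠ -1))) :
    pvLoopB N size (fb + 1) res used ((x, c + 1) :: rest) =
      pvLoopB N size fb res used ((x, c) :: rest) := by
  simp only [pvLoopB]
  rw [if_neg hx, if_neg (by omega : ¬(c + 1 = 0))]
  simp only [Nat.add_sub_cancel]
  rw [if_pos hc]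

theorem pvLoopB_place {N size fb x c : Nat} {res : List Int} {used : List Bool}
    {rest : List (Nat × Nat)} (hx : x ≠ size)
    (hc : ¬(used.getD c false = true ∨
      (c + 1 ≠ 1 ∧ (size ≤ x + (c + 1) ∨ res.getD (x + (c + 1)) (-1) ≠ -1)))) :
    pvLoopB N size (fb + 1) res used ((x, c + 1) :: rest) =
      pvLoopB N size fb
        (if c + 1 ≠ 1 then (res.set x ((c : Int) + 1)).set (x + (c + 1)) ((c : Int) + 1)
         else res.set x ((c : Int) + 1))
        (used.set c true)
        ((pvFirstEmpty size
            (if c + 1 ≠ 1 then (res.set x ((c : Int) + 1)).set (x + (c + 1)) ((c : Int) + 1)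
             else res.set x ((c : Int) + 1)) (x + 1), N) :: (x, c) :: rest) := by
  have hcast : ((c + 1 : Nat) : Int) = (c : Int) + 1 := by push_cast; ring
  simp only [pvLoopB]
  rw [if_neg hx, if_neg (by omega : ¬(c + 1 = 0))]
  simp only [Nat.add_sub_cancel]
  rw [if_neg hc]
  simp only [hcast]

-- pvFirstEmpty facts
theorem pvFirstEmpty_stop {size : Nat} {res : List Int} {i : Nat} (h : ¬ i < size) :
    pvFirstEmpty size res i = i := by
  rw [pvFirstEmpty]; rw [if_neg h]

theorem pvFirstEmpty_here {size : Nat} {res : List Int} {i : Nat} (h : i < size)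
    (hres : res.getD i (-1) = -1) :
    pvFirstEmpty size res i = i := by
  rw [pvFirstEmpty]; rw [if_pos h, if_neg (not_not_intro hres)]

theorem pvFirstEmpty_step {size : Nat} {res : List Int} {i : Nat} (h : i < size)
    (hres : res.getD i (-1) ≠ -1) :
    pvFirstEmpty size res i = pvFirstEmpty size res (i + 1) := by
  rw [pvFirstEmpty]; rw [if_pos h, if_pos hres]

-- pvFuel facts
theorem pvFuel_pos (N f : Nat) : 1 ≤ pvFuel N f := by
  cases f with
  | zero => simp [pvFuel]
  | succ f => simp only [pvFuel]; nlinarith [Nat.zero_le (pvFuel N f), Nat.zero_le N]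

theorem pvFuel_le_succ (N f : Nat) : pvFuel N f ≤ pvFuel N (f + 1) := by
  simp only [pvFuel]; nlinarith [Nat.zero_le (pvFuel N f), Nat.zero_le N]

-- goal shapes for the simulation (proof-only helpers)
def pvTryGoal (N f x c : Nat) (res : List Int) (used : List Bool)
    (rest : List (Nat × Nat)) (k : Nat) : Prop :=
  ((pvTryA (fun r u => pvDfsA N f (x + 1) r u) N x c res used).1 = true →
    ∀ fb, pvLoopB N (2 * N - 1) (fb + k) res used ((x, c) :: rest) =
      (pvTryA (fun r u => pvDfsA N f (x + 1) r u) N x c res used).2.1) ∧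
  ((pvTryA (fun r u => pvDfsA N f (x + 1) r u) N x c res used).1 = false →
    pvTryA (fun r u => pvDfsA N f (x + 1) r u) N x c res used = (false, res, used) ∧
    ∀ fb, pvLoopB N (2 * N - 1) (fb + k) res used ((x, c) :: rest) =
      pvLoopB N (2 * N - 1) fb res used ((x, 0) :: rest))

def pvDfsGoal (N f x : Nat) (res : List Int) (used : List Bool)
    (rest : List (Nat × Nat)) (k : Nat) : Prop :=
  ((pvDfsA N f x res used).1 = true →
    ∀ fb, pvLoopB N (2 * N - 1) (fb + k) res used
        ((pvFirstEmpty (2 * N - 1) res x, N) :: rest) = (pvDfsA N f x res used).2.1) ∧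
  ((pvDfsA N f x res used).1 = false →
    pvDfsA N f x res used = (false, res, used) ∧
    pvFirstEmpty (2 * N - 1) res x < 2 * N - 1 ∧
    ∀ fb, pvLoopB N (2 * N - 1) (fb + k) res used
        ((pvFirstEmpty (2 * N - 1) res x, N) :: rest) =
      pvLoopB N (2 * N - 1) fb res used ((pvFirstEmpty (2 * N - 1) res x, 0) :: rest))

theorem pvTryA_step_place {dfs : List Int → List Bool → Bool × List Int × List Bool}
    {n x m : Nat} {res : List Int} {used : List Bool}
    (hu : used.getD m false = false)
    (hd : ¬(m + 1 ≠ 1 ∧ (2 * n - 1 ≤ x + (m + 1) ∨ res.getD (x + (m + 1)) (-1) ≠ -1))) :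
    pvTryA dfs n x (m + 1) res used =
      (if (dfs (if m + 1 ≠ 1 then (res.set x ((m : Int) + 1)).set (x + (m + 1)) ((m : Int) + 1)
                else res.set x ((m : Int) + 1)) (used.set m true)).1 = true
       then dfs (if m + 1 ≠ 1 then (res.set x ((m : Int) + 1)).set (x + (m + 1)) ((m : Int) + 1)
                else res.set x ((m : Int) + 1)) (used.set m true)
       else pvTryA dfs n x m
         (if m + 1 ≠ 1 then
            ((dfs (if m + 1 ≠ 1 then (res.set x ((m : Int) + 1)).set (x + (m + 1)) ((m : Int) + 1)
                   else res.set x ((m : Int) + 1)) (used.set m true)).2.1.set x (-1)).set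
              (x + (m + 1)) (-1)
          else (dfs (if m + 1 ≠ 1 then (res.set x ((m : Int) + 1)).set (x + (m + 1)) ((m : Int) + 1)
                     else res.set x ((m : Int) + 1)) (used.set m true)).2.1.set x (-1))
         ((dfs (if m + 1 ≠ 1 then (res.set x ((m : Int) + 1)).set (x + (m + 1)) ((m : Int) + 1)
                else res.set x ((m : Int) + 1)) (used.set m true)).2.2.set m false)) := by
  by_cases h1 : m + 1 = 1
  · simp only [if_neg (not_not_intro h1)]
    exact pvTryA_step_place1 hu h1
  · have h2 : ¬(2 * n - 1 ≤ x + (m + 1) ∨ res.getD (x + (m + 1)) (-1) ≠ -1) :=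
      fun hor => hd ⟨h1, hor⟩
    simp only [if_pos h1]
    exact pvTryA_step_place2 hu h1 h2

theorem pv_trySim (N f x : Nat)
    (HD : ∀ res used rest, res.length = 2 * N - 1 → used.length = N →
      ∃ k, k ≤ pvFuel N f ∧ pvDfsGoal N f (x + 1) res used rest k)
    (hx : x + (f + 1) = 2 * N - 1) :
    ∀ c, c ≤ N → ∀ res used rest, res.length = 2 * N - 1 → used.length = N →
      res.getD x (-1) = -1 →
      ∃ k, k ≤ c * (pvFuel N f + 2) ∧ pvTryGoal N f x c res used rest k := by
  intro c
  induction c with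
  | zero =>
    intro _ res used rest _ _ _
    refine ⟨0, by omega, ?_, ?_⟩
    · intro h; simp [pvTryA] at h
    · intro _; exact ⟨by simp [pvTryA], fun fb => rfl⟩
  | succ m ihm =>
    intro hc res used rest hlr hlu hresx
    have hcm : m ≤ N := by omega
    have hxne : x ≠ 2 * N - 1 := by omega
    have hmu : m < used.length := by omega
    have hxres : x < res.length := by omega
    have hexp : (m + 1) * (pvFuel N f + 2) = m * (pvFuel N f + 2) + (pvFuel N f + 2) := by ring
    have hFpos := pvFuel_pos N f
    cases hu : used.getD m false with
    | true =>
      have hA := pvTryA_step_used (dfs := fun r u => pvDfsA N f (x + 1) r u)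
        (n := N) (x := x) (res := res) (used := used) hu
      obtain ⟨k, hk, hg⟩ := ihm hcm res used rest hlr hlu hresx
      refine ⟨k + 1, by omega, ?_⟩
      unfold pvTryGoal at hg ⊢
      rw [hA]
      constructor
      · intro ht fb
        rw [show fb + (k + 1) = (fb + k) + 1 from by omega, pvLoopB_skip hxne (Or.inl hu)]
        exact hg.1 ht fb
      · intro hf
        obtain ⟨heq, hloop⟩ := hg.2 hf
        refine ⟨heq, fun fb => ?_⟩
        rw [show fb + (k + 1) = (fb + k) + 1 from by omega, pvLoopB_skip hxne (Or.inl hu)]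
        exact hloop fb
    | false =>
      by_cases hsk : m + 1 ≠ 1 ∧ (2 * N - 1 ≤ x + (m + 1) ∨ res.getD (x + (m + 1)) (-1) ≠ -1)
      · have hA := pvTryA_step_skip (dfs := fun r u => pvDfsA N f (x + 1) r u) hu hsk
        obtain ⟨k, hk, hg⟩ := ihm hcm res used rest hlr hlu hresx
        refine ⟨k + 1, by omega, ?_⟩
        unfold pvTryGoal at hg ⊢
        rw [hA]
        constructor
        · intro ht fb
          rw [show fb + (k + 1) = (fb + k) + 1 from by omega, pvLoopB_skip hxne (Or.inr hsk)]
          exact hg.1 ht fb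
        · intro hf
          obtain ⟨heq, hloop⟩ := hg.2 hf
          refine ⟨heq, fun fb => ?_⟩
          rw [show fb + (k + 1) = (fb + k) + 1 from by omega, pvLoopB_skip hxne (Or.inr hsk)]
          exact hloop fb
      · -- place candidate m+1 at x (and x+(m+1) when m+1 ≠ 1)
        have hA := pvTryA_step_place (dfs := fun r u => pvDfsA N f (x + 1) r u) hu hsk
        have hbc : ¬(used.getD m false = true ∨
            (m + 1 ≠ 1 ∧ (2 * N - 1 ≤ x + (m + 1) ∨ res.getD (x + (m + 1)) (-1) ≠ -1))) := by
          rintro (h | h)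
          · rw [hu] at h; cases h
          · exact hsk h
        have hBstep : ∀ fb, pvLoopB N (2 * N - 1) (fb + 1) res used ((x, m + 1) :: rest) =
            pvLoopB N (2 * N - 1) fb
              (if m + 1 ≠ 1 then (res.set x ((m : Int) + 1)).set (x + (m + 1)) ((m : Int) + 1)
               else res.set x ((m : Int) + 1))
              (used.set m true)
              ((pvFirstEmpty (2 * N - 1)
                  (if m + 1 ≠ 1 then (res.set x ((m : Int) + 1)).set (x + (m + 1)) ((m : Int) + 1)
                   else res.set x ((m : Int) + 1)) (x + 1), N) :: (x, m) :: rest) :=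
          fun fb => pvLoopB_place hxne hbc
        set res2 := (if m + 1 ≠ 1 then (res.set x ((m : Int) + 1)).set (x + (m + 1)) ((m : Int) + 1)
          else res.set x ((m : Int) + 1)) with hres2
        have hlr2 : res2.length = 2 * N - 1 := by rw [hres2]; split <;> simp [hlr]
        have hlu2 : (used.set m true).length = N := by simp [hlu]
        obtain ⟨kc, hkc, hgc⟩ := HD res2 (used.set m true) ((x, m) :: rest) hlr2 hlu2
        unfold pvDfsGoal at hgc
        have hresget : res[x]? = some (-1) := pv_getElem?_of_getD hxres hresx
        have husedget : used[m]? = some false := pv_getElem?_of_getD hmu hu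
        have hundoU : (used.set m true).set m false = used := by
          rw [List.set_set]; exact pv_set_self husedget
        have hundoR : (if m + 1 ≠ 1 then (res2.set x (-1)).set (x + (m + 1)) (-1)
            else res2.set x (-1)) = res := by
          by_cases h1 : m + 1 = 1
          · rw [hres2]
            simp only [if_neg (not_not_intro h1)]
            rw [List.set_set]; exact pv_set_self hresget
          · have hd2 : ¬(2 * N - 1 ≤ x + (m + 1) ∨ res.getD (x + (m + 1)) (-1) ≠ -1) :=
              fun hor => hsk ⟨h1, hor⟩
            push_neg at hd2
            obtain ⟨hjlt, hjval⟩ := hd2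
            have hresj : res[x + (m + 1)]? = some (-1) := pv_getElem?_of_getD (by omega) hjval
            have hxj : x ≠ x + (m + 1) := by omega
            rw [hres2]
            simp only [if_pos h1]
            rw [List.set_comm _ _ hxj, List.set_set, List.set_comm _ _ hxj, List.set_set,
              pv_set_self hresj, pv_set_self hresget]
        cases houtb : (pvDfsA N f (x + 1) res2 (used.set m true)).1 with
        | true =>
          refine ⟨kc + 1, by omega, ?_⟩
          unfold pvTryGoal
          simp only [hA]
          rw [if_pos houtb]
          constructor
          · intro _ fb
            rw [show fb + (kc + 1) = (fb + kc) + 1 from by omega, hBstep (fb + kc)]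
            exact hgc.1 houtb fb
          · intro hf
            rw [houtb] at hf; cases hf
        | false =>
          obtain ⟨heqc, hltc, hloopc⟩ := hgc.2 houtb
          obtain ⟨km, hkm, hgm⟩ := ihm hcm res used rest hlr hlu hresx
          unfold pvTryGoal at hgm
          refine ⟨km + kc + 2, by omega, ?_⟩
          unfold pvTryGoal
          simp only [hA]
          rw [if_neg (by simp [houtb])]
          simp only [heqc, hundoR, hundoU]
          have hloopAll : ∀ fb, pvLoopB N (2 * N - 1) (fb + (km + kc + 2)) res used
              ((x, m + 1) :: rest) = pvLoopB N (2 * N - 1) (fb + km) res used ((x, m) :: rest) := by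
            intro fb
            rw [show fb + (km + kc + 2) = (fb + (km + kc + 1)) + 1 from by omega,
              hBstep (fb + (km + kc + 1)),
              show fb + (km + kc + 1) = (fb + km + 1) + kc from by omega,
              hloopc (fb + km + 1)]
            rw [pvLoopB_pop (show ¬ pvFirstEmpty (2 * N - 1) res2 (x + 1) = 2 * N - 1 from by omega),
              hundoR, hundoU]
          constructor
          · intro ht fb
            rw [hloopAll fb]
            exact hgm.1 ht fb
          · intro hf
            obtain ⟨heq, hloop⟩ := hgm.2 hf
            refine ⟨heq, fun fb => ?_⟩
            rw [hloopAll fb]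
            exact hloop fb

theorem pv_dfsSim (N : Nat) : ∀ f x res used rest, x + f = 2 * N - 1 →
    res.length = 2 * N - 1 → used.length = N →
    ∃ k, k ≤ pvFuel N f ∧ pvDfsGoal N f x res used rest k := by
  intro f
  induction f using Nat.strong_induction_on with
  | _ f IH =>
  intro x res used rest hx hlr hlu
  cases f with
  | zero =>
    have hxe : x = 2 * N - 1 := by omega
    have hFE : pvFirstEmpty (2 * N - 1) res x = x := pvFirstEmpty_stop (by omega)
    refine ⟨1, pvFuel_pos N 0, ?_, ?_⟩
    · intro _ fb
      rw [hFE, pvLoopB_break hxe]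
      simp [pvDfsA]
    · intro hfalse
      simp [pvDfsA] at hfalse
  | succ f' =>
    have hxlt : x < 2 * N - 1 := by omega
    by_cases hres : res.getD x (-1) ≠ -1
    · have hA : pvDfsA N (f' + 1) x res used = pvDfsA N f' (x + 1) res used := by
        simp only [pvDfsA]; rw [if_pos hres]
      have hFE : pvFirstEmpty (2 * N - 1) res x = pvFirstEmpty (2 * N - 1) res (x + 1) :=
        pvFirstEmpty_step hxlt hres
      obtain ⟨k, hk, hg⟩ := IH f' (by omega) (x + 1) res used rest (by omega) hlr hlu
      refine ⟨k, le_trans hk (pvFuel_le_succ N f'), ?_⟩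
      unfold pvDfsGoal at hg ⊢
      rw [hA, hFE]
      exact hg
    · push_neg at hres
      have hFE : pvFirstEmpty (2 * N - 1) res x = x := pvFirstEmpty_here hxlt hres
      have hA : pvDfsA N (f' + 1) x res used =
          pvTryA (fun r u => pvDfsA N f' (x + 1) r u) N x N res used := by
        simp only [pvDfsA]; rw [if_neg (not_not_intro hres)]
      obtain ⟨k, hk, hg⟩ := pv_trySim N f' x
        (fun r u rr h1 h2 => IH f' (by omega) (x + 1) r u rr (by omega) h1 h2)
        hx N le_rfl res used rest hlr hlu hres
      refine ⟨k, ?_, ?_⟩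
      · have he : pvFuel N (f' + 1) = N * (pvFuel N f' + 2) + (pvFuel N f' + 2) := by
          simp only [pvFuel]; ring
        omega
      · unfold pvDfsGoal
        unfold pvTryGoal at hg
        rw [hA, hFE]
        exact ⟨hg.1, fun hf => ⟨(hg.2 hf).1, hxlt, (hg.2 hf).2⟩⟩

-- ===== VERDICT (by name: the statement is the Claim_ definition above) =====
theorem constructDistancedSequence_spec : Claim_equal_constructDistancedSequence := by
  intro n _hdom hpre
  obtain ⟨hpre, -⟩ := hpre
  unfold Spec_constructDistancedSequence
  simp only [constructDistancedSequence, constructDistancedSequence_alt]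
  set N := n.toNat with hN
  have hN1 : 1 ≤ N := by omega
  set res0 := List.replicate (2 * N - 1) (-1 : Int) with hres0
  set used0 := List.replicate N false with hused0
  obtain ⟨k, hk, hgoal⟩ := pv_dfsSim N (2 * N - 1) 0 res0 used0 [] (by omega)
    (by simp [hres0]) (by simp [hused0])
  have hFE : pvFirstEmpty (2 * N - 1) res0 0 = 0 := by
    apply pvFirstEmpty_here (by omega)
    rw [hres0, List.getD_eq_getElem?_getD, List.getElem?_replicate, if_pos (by omega)]
    rfl
  have hfuel : pvFuel N (2 * N - 1) + 2 = (pvFuel N (2 * N - 1) + 2 - k) + k := by omega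
  cases hout : (pvDfsA N (2 * N - 1) 0 res0 used0).1 with
  | true =>
    have hthis := hgoal.1 hout (pvFuel N (2 * N - 1) + 2 - k)
    rw [hFE] at hthis
    rw [hfuel, hFE]
    exact hthis.symm
  | false =>
    obtain ⟨heq, hlt, hloop⟩ := hgoal.2 hout
    have hstep := hloop (pvFuel N (2 * N - 1) + 2 - k)
    rw [hFE] at hstep hlt
    rw [hfuel, hFE, hstep]
    have h2 : pvFuel N (2 * N - 1) + 2 - k = (pvFuel N (2 * N - 1) - k) + 1 + 1 := by omega
    rw [h2, pvLoopB_pop_root (by omega), pvLoopB_nil, heq]
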